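-- pv_equiv track=rewrite | github.com/signalnine/tildebin | boxctl/scripts/baremetal/process_capabilities_auditor.py | parse_capability_hex
-- ===== SOURCE A (Python) =====
-- CAPABILITIES = {
--     0: "CAP_CHOWN",
--     1: "CAP_DAC_OVERRIDE",
--     2: "CAP_DAC_READ_SEARCH",
--     3: "CAP_FOWNER",
--     4: "CAP_FSETID",
--     5: "CAP_KILL",
--     6: "CAP_SETGID",
--     7: "CAP_SETUID",
--     8: "CAP_SETPCAP",
--     9: "CAP_LINUX_IMMUTABLE",
--     10: "CAP_NET_BIND_SERVICE",
--     11: "CAP_NET_BROADCAST",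
--     12: "CAP_NET_ADMIN",
--     13: "CAP_NET_RAW",
--     14: "CAP_IPC_LOCK",
--     15: "CAP_IPC_OWNER",
--     16: "CAP_SYS_MODULE",
--     17: "CAP_SYS_RAWIO",
--     18: "CAP_SYS_CHROOT",
--     19: "CAP_SYS_PTRACE",
--     20: "CAP_SYS_PACCT",
--     21: "CAP_SYS_ADMIN",
--     22: "CAP_SYS_BOOT",
--     23: "CAP_SYS_NICE",
--     24: "CAP_SYS_RESOURCE",
--     25: "CAP_SYS_TIME",
--     26: "CAP_SYS_TTY_CONFIG",
--     27: "CAP_MKNOD",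
--     28: "CAP_LEASE",
--     29: "CAP_AUDIT_WRITE",
--     30: "CAP_AUDIT_CONTROL",
--     31: "CAP_SETFCAP",
--     32: "CAP_MAC_OVERRIDE",
--     33: "CAP_MAC_ADMIN",
--     34: "CAP_SYSLOG",
--     35: "CAP_WAKE_ALARM",
--     36: "CAP_BLOCK_SUSPEND",
--     37: "CAP_AUDIT_READ",
--     38: "CAP_PERFMON",
--     39: "CAP_BPF",
--     40: "CAP_CHECKPOINT_RESTORE",
-- }
--
-- def parse_capability_hex(hex_str: str) -> list[str]:
--     """Parse capability hex string to list of capability names."""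
--     try:
--         cap_bits = int(hex_str, 16)
--     except ValueError:
--         return []
--
--     caps = []
--     for bit, name in CAPABILITIES.items():
--         if cap_bits & (1 << bit):
--             caps.append(name)
--
--     return caps
-- ===== SOURCE B (Python) =====
-- CAP_NAMES = [
--     "CAP_CHOWN", "CAP_DAC_OVERRIDE", "CAP_DAC_READ_SEARCH", "CAP_FOWNER",
--     "CAP_FSETID", "CAP_KILL", "CAP_SETGID", "CAP_SETUID", "CAP_SETPCAP",
--     "CAP_LINUX_IMMUTABLE", "CAP_NET_BIND_SERVICE", "CAP_NET_BROADCAST",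
--     "CAP_NET_ADMIN", "CAP_NET_RAW", "CAP_IPC_LOCK", "CAP_IPC_OWNER",
--     "CAP_SYS_MODULE", "CAP_SYS_RAWIO", "CAP_SYS_CHROOT", "CAP_SYS_PTRACE",
--     "CAP_SYS_PACCT", "CAP_SYS_ADMIN", "CAP_SYS_BOOT", "CAP_SYS_NICE",
--     "CAP_SYS_RESOURCE", "CAP_SYS_TIME", "CAP_SYS_TTY_CONFIG", "CAP_MKNOD",
--     "CAP_LEASE", "CAP_AUDIT_WRITE", "CAP_AUDIT_CONTROL", "CAP_SETFCAP",
--     "CAP_MAC_OVERRIDE", "CAP_MAC_ADMIN", "CAP_SYSLOG", "CAP_WAKE_ALARM",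
--     "CAP_BLOCK_SUSPEND", "CAP_AUDIT_READ", "CAP_PERFMON", "CAP_BPF",
--     "CAP_CHECKPOINT_RESTORE",
-- ]
--
-- def parse_capability_hex(hex_str: str) -> list[str]:
--     """Parse capability hex string to list of capability names."""
--     try:
--         bits = int(hex_str, 16)
--     except ValueError:
--         return []
--     bits &= (1 << 41) - 1
--     caps = []
--     while bits:
--         cleared = bits & (bits - 1)
--         low = bits - cleared
--         caps.append(CAP_NAMES[low.bit_length() - 1])
--         bits = cleared
--     return caps
-- ===== Notes on version B (the rewrite author's own statement) =====
-- stated objective: alternative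
-- what changed: B masks the parsed value to the low 41 bits and walks only the set bits with the lowest-set-bit trick (bits & (bits-1)), instead of scanning all 41 dictionary entries and testing each with a shifted mask.
import Mathlib
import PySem

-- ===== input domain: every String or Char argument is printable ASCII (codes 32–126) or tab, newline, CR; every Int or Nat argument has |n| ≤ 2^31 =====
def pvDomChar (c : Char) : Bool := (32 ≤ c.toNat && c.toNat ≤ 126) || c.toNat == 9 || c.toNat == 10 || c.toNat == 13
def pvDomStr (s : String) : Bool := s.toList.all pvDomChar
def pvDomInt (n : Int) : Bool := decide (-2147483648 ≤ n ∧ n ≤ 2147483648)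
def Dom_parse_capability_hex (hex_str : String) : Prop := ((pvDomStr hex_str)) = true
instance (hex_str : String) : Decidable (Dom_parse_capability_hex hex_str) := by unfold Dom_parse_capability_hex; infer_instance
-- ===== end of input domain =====

-- B walks only the set bits of the (41-bit-masked) value via the lowest-set-bit trick
-- instead of A's scan over all 41 table entries; objective: alternative (same result, different traversal).

-- ===== PORT A =====
-- the CAPABILITIES dict: insertion-ordered association list; .items() is the list itself
def CAPITEMS : List (Int × String) :=
  [(0, "CAP_CHOWN"), (1, "CAP_DAC_OVERRIDE"), (2, "CAP_DAC_READ_SEARCH"), (3, "CAP_FOWNER"),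
   (4, "CAP_FSETID"), (5, "CAP_KILL"), (6, "CAP_SETGID"), (7, "CAP_SETUID"), (8, "CAP_SETPCAP"),
   (9, "CAP_LINUX_IMMUTABLE"), (10, "CAP_NET_BIND_SERVICE"), (11, "CAP_NET_BROADCAST"),
   (12, "CAP_NET_ADMIN"), (13, "CAP_NET_RAW"), (14, "CAP_IPC_LOCK"), (15, "CAP_IPC_OWNER"),
   (16, "CAP_SYS_MODULE"), (17, "CAP_SYS_RAWIO"), (18, "CAP_SYS_CHROOT"), (19, "CAP_SYS_PTRACE"),
   (20, "CAP_SYS_PACCT"), (21, "CAP_SYS_ADMIN"), (22, "CAP_SYS_BOOT"), (23, "CAP_SYS_NICE"),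
   (24, "CAP_SYS_RESOURCE"), (25, "CAP_SYS_TIME"), (26, "CAP_SYS_TTY_CONFIG"), (27, "CAP_MKNOD"),
   (28, "CAP_LEASE"), (29, "CAP_AUDIT_WRITE"), (30, "CAP_AUDIT_CONTROL"), (31, "CAP_SETFCAP"),
   (32, "CAP_MAC_OVERRIDE"), (33, "CAP_MAC_ADMIN"), (34, "CAP_SYSLOG"), (35, "CAP_WAKE_ALARM"),
   (36, "CAP_BLOCK_SUSPEND"), (37, "CAP_AUDIT_READ"), (38, "CAP_PERFMON"), (39, "CAP_BPF"),
   (40, "CAP_CHECKPOINT_RESTORE")]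

-- try: cap_bits = int(hex_str, 16) except ValueError: return [];
-- for bit, name in CAPABILITIES.items(): if cap_bits & (1 << bit): caps.append(name)
-- ('1 << bit' uses bit.toNat: every key is a nonnegative literal, where this is exact)
def parse_capability_hex (hex_str : String) : List String :=
  match PySem.Int.ofStrBase? hex_str 16 with
  | none => []
  | some cap_bits =>
      CAPITEMS.foldl (fun caps p =>
        if PySem.Int.band cap_bits ((1 : Int) <<< ((p.1.toNat : Nat) : Int)) ≠ 0 then caps ++ [p.2] else caps) []

-- ===== PORT B =====
def CAP_NAMES : List String :=
  ["CAP_CHOWN", "CAP_DAC_OVERRIDE", "CAP_DAC_READ_SEARCH", "CAP_FOWNER",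
   "CAP_FSETID", "CAP_KILL", "CAP_SETGID", "CAP_SETUID", "CAP_SETPCAP",
   "CAP_LINUX_IMMUTABLE", "CAP_NET_BIND_SERVICE", "CAP_NET_BROADCAST",
   "CAP_NET_ADMIN", "CAP_NET_RAW", "CAP_IPC_LOCK", "CAP_IPC_OWNER",
   "CAP_SYS_MODULE", "CAP_SYS_RAWIO", "CAP_SYS_CHROOT", "CAP_SYS_PTRACE",
   "CAP_SYS_PACCT", "CAP_SYS_ADMIN", "CAP_SYS_BOOT", "CAP_SYS_NICE",
   "CAP_SYS_RESOURCE", "CAP_SYS_TIME", "CAP_SYS_TTY_CONFIG", "CAP_MKNOD",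
   "CAP_LEASE", "CAP_AUDIT_WRITE", "CAP_AUDIT_CONTROL", "CAP_SETFCAP",
   "CAP_MAC_OVERRIDE", "CAP_MAC_ADMIN", "CAP_SYSLOG", "CAP_WAKE_ALARM",
   "CAP_BLOCK_SUSPEND", "CAP_AUDIT_READ", "CAP_PERFMON", "CAP_BPF",
   "CAP_CHECKPOINT_RESTORE"]

-- the 'while bits:' loop of Source B; fuel only makes the recursion total (bits.toNat steps
-- always suffice: the masked value is nonnegative and strictly decreases each iteration)
def extractCaps (fuel : Nat) (bits : Int) : List String :=
  match fuel with
  | 0 => []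
  | f + 1 =>
      if bits = 0 then []
      else
        let cleared := PySem.Int.band bits (bits - 1)
        let low := bits - cleared
        PySem.List.pyGetD CAP_NAMES ((PySem.Int.bitLength low : Int) - 1) ""
          :: extractCaps f cleared

def parse_capability_hex_alt (hex_str : String) : List String :=
  match PySem.Int.ofStrBase? hex_str 16 with
  | none => []
  | some bits0 =>
      let bits := PySem.Int.band bits0 (((1 : Int) <<< 41) - 1)
      extractCaps bits.toNat bits

-- ===== PRECONDITION & SPEC =====
def Spec_parse_capability_hex (hex_str : String) (out : List String) : Prop := out = parse_capability_hex_alt hex_str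
instance (hex_str : String) (out : List String) : Decidable (Spec_parse_capability_hex hex_str out) := by unfold Spec_parse_capability_hex; infer_instance

-- ===== CLAIM (what is proved, stated in full; the proofs are below) =====
def Claim_equal_parse_capability_hex : Prop := ∀ (hex_str : String), Dom_parse_capability_hex hex_str → Spec_parse_capability_hex hex_str (parse_capability_hex hex_str)

-- ===== LEMMAS AND PROOFS =====

-- name of capability bit i (proof-side view of both tables)
def capName (i : Nat) : String := CAP_NAMES.getD i ""

-- clearing the lowest set bit strictly decreases
theorem and_pred_lt {M : Nat} (h : 0 < M) : M &&& (M - 1) < M :=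
  lt_of_le_of_lt Nat.and_le_right (by omega)

-- fuel-free view of the while-loop of B, recursing on the cleared value
def extractF (names : Nat → String) (M : Nat) : List String :=
  if h : M = 0 then []
  else
    names (PySem.Int.bitLength ((M - (M &&& (M - 1)) : Nat) : Int) - 1)
      :: extractF names (M &&& (M - 1))
termination_by M
decreasing_by exact and_pred_lt (Nat.pos_of_ne_zero h)

-- bit-scan view shared by both programs
def bitScan (names : Nat → String) (w M : Nat) : List String :=
  (List.range w).filterMap (fun i => if M.testBit i then some (names i) else none)

theorem extractF_zero (names : Nat → String) : extractF names 0 = [] := by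
  unfold extractF; simp

-- (2M+1) &&& (2M) = 2M
theorem and_pred_odd (M : Nat) : (2 * M + 1) &&& (2 * M) = 2 * M := by
  apply Nat.eq_of_testBit_eq
  intro i
  rw [Nat.testBit_and]
  cases i with
  | zero =>
      have h1 : (2 * M).testBit 0 = false := by simp [Nat.testBit_zero]
      simp [h1]
  | succ i =>
      simp only [Nat.testBit_succ]
      have h1 : (2 * M + 1) / 2 = M := by omega
      have h2 : (2 * M) / 2 = M := by omega
      rw [h1, h2, Bool.and_self]

-- (2M) &&& (2M-1) = 2 * (M &&& (M-1)) for M > 0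
theorem and_pred_even {M : Nat} (h : 0 < M) : (2 * M) &&& (2 * M - 1) = 2 * (M &&& (M - 1)) := by
  apply Nat.eq_of_testBit_eq
  intro i
  rw [Nat.testBit_and]
  cases i with
  | zero =>
      have h1 : (2 * M).testBit 0 = false := by simp [Nat.testBit_zero]
      have h2 : (2 * (M &&& (M - 1))).testBit 0 = false := by simp [Nat.testBit_zero]
      simp [h1, h2]
  | succ i =>
      simp only [Nat.testBit_succ]
      have h1 : (2 * M) / 2 = M := by omega
      have h2 : (2 * M - 1) / 2 = M - 1 := by omega
      have h3 : (2 * (M &&& (M - 1))) / 2 = M &&& (M - 1) := by omega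
      rw [h1, h2, h3, Nat.testBit_and]

theorem bitLength_two_mul {p : Nat} (h : 0 < p) :
    PySem.Int.bitLength ((2 * p : Nat) : Int) = PySem.Int.bitLength (p : Int) + 1 := by
  have := PySem.Int.bitLength_natCast (m := 2 * p) (by omega)
  simpa [Nat.mul_div_cancel_left p (by norm_num : 0 < 2)] using this

theorem bitLength_pos {p : Nat} (h : 0 < p) : 0 < PySem.Int.bitLength (p : Int) := by
  have := PySem.Int.bitLength_natCast (m := p) h
  omega

-- B's loop shifts: even value = loop on the half with names shifted by one
theorem extractF_even (names : Nat → String) (M : Nat) :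
    extractF names (2 * M) = extractF (fun i => names (i + 1)) M := by
  induction M using Nat.strong_induction_on with
  | _ M ih =>
    by_cases h : M = 0
    · simp [h, extractF_zero]
    · have hM : 0 < M := Nat.pos_of_ne_zero h
      have hlow : 0 < M - (M &&& (M - 1)) := by
        have := and_pred_lt hM; omega
      have h2M : ¬ (2 * M = 0) := by omega
      conv_lhs => rw [extractF]
      conv_rhs => rw [extractF]
      simp only [h, h2M, dite_false]
      rw [and_pred_even hM]
      have hlowe : 2 * M - 2 * (M &&& (M - 1)) = 2 * (M - (M &&& (M - 1))) := by
        have := Nat.and_le_right (n := M) (m := M - 1); omega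
      rw [hlowe, bitLength_two_mul hlow]
      have hbl := bitLength_pos hlow
      have hidx : PySem.Int.bitLength ((M - (M &&& (M - 1)) : Nat) : Int) + 1 - 1
          = (PySem.Int.bitLength ((M - (M &&& (M - 1)) : Nat) : Int) - 1) + 1 := by omega
      rw [hidx, ih _ (and_pred_lt hM)]

theorem extractF_odd (names : Nat → String) (M : Nat) :
    extractF names (2 * M + 1) = names 0 :: extractF names (2 * M) := by
  rw [extractF]
  have h : ¬ (2 * M + 1 = 0) := by omega
  simp only [h, dite_false, Nat.add_sub_cancel]
  rw [and_pred_odd]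
  have hlow : 2 * M + 1 - 2 * M = 1 := by omega
  rw [hlow]
  simp only [Nat.cast_one]
  rw [show PySem.Int.bitLength (1 : Int) = 1 from by decide]

theorem bitScan_zero (names : Nat → String) (M : Nat) : bitScan names 0 M = [] := by
  simp [bitScan]

theorem bitScan_step (names : Nat → String) (w M : Nat) :
    bitScan names (w + 1) M =
      (if M.testBit 0 then some (names 0) else none).toList
        ++ bitScan (fun i => names (i + 1)) w (M / 2) := by
  unfold bitScan
  rw [List.range_succ_eq_map]
  by_cases h : M.testBit 0 <;>
    simp [List.filterMap_map, Nat.testBit_succ, h]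

-- core: the lowest-set-bit loop equals the bit scan, for values below 2^w
theorem extractF_eq_bitScan (w : Nat) : ∀ (names : Nat → String) (M : Nat), M < 2 ^ w →
    extractF names M = bitScan names w M := by
  induction w with
  | zero =>
      intro names M hM
      have h0 : M = 0 := by omega
      subst h0
      simp [extractF_zero, bitScan_zero]
  | succ w ih =>
      intro names M hM
      rcases Nat.even_or_odd M with ⟨q, hq⟩ | ⟨q, hq⟩
      · subst hq
        rw [show q + q = 2 * q by ring, extractF_even]
        rw [ih _ q (by omega : q < 2 ^ w)]
        rw [bitScan_step]
        have ht : (2 * q).testBit 0 = false := by simp [Nat.testBit_zero]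
        have hd : (2 * q) / 2 = q := by omega
        simp [ht, hd]
      · subst hq
        rw [extractF_odd, extractF_even]
        rw [ih _ q (by omega : q < 2 ^ w)]
        rw [bitScan_step]
        have ht : (2 * q + 1).testBit 0 = true := by simp [Nat.testBit_zero]
        have hd : (2 * q + 1) / 2 = q := by omega
        simp [ht, hd]

-- one unfolding of B's loop body
theorem extractCaps_step (f : Nat) (b : Int) (h : ¬ b = 0) :
    extractCaps (f + 1) b
      = PySem.List.pyGetD CAP_NAMES
          ((PySem.Int.bitLength (b - PySem.Int.band b (b - 1)) : Int) - 1) ""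
          :: extractCaps f (PySem.Int.band b (b - 1)) := by
  rw [extractCaps, if_neg h]

-- the fueled port computes the fuel-free loop whenever fuel ≥ value
theorem extractCaps_eq_extractF : ∀ (f M : Nat), M ≤ f →
    extractCaps f (M : Int) = extractF capName M := by
  intro f
  induction f with
  | zero =>
      intro M hM
      have : M = 0 := by omega
      simp [this, extractCaps, extractF_zero]
  | succ f ih =>
      intro M hM
      by_cases h : M = 0
      · simp [h, extractCaps, extractF_zero]
      · have hM0 : 0 < M := Nat.pos_of_ne_zero h
        have hne : ¬ ((M : Int) = 0) := by exact_mod_cast h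
        rw [extractCaps_step f _ hne]
        have hcast : (M : Int) - 1 = ((M - 1 : Nat) : Int) := by omega
        rw [hcast, PySem.Int.band_natCast]
        have hand := Nat.and_le_right (n := M) (m := M - 1)
        have hlowc : (M : Int) - ((M &&& (M - 1) : Nat) : Int) = ((M - (M &&& (M - 1)) : Nat) : Int) := by
          omega
        rw [hlowc]
        have hlow : 0 < M - (M &&& (M - 1)) := by have := and_pred_lt hM0; omega
        have hbl := bitLength_pos hlow
        have hidx : (PySem.Int.bitLength ((M - (M &&& (M - 1)) : Nat) : Int) : Int) - 1
            = ((PySem.Int.bitLength ((M - (M &&& (M - 1)) : Nat) : Int) - 1 : Nat) : Int) := by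
          omega
        rw [hidx, PySem.List.pyGetD_natCast]
        rw [ih (M &&& (M - 1)) (by omega)]
        conv_rhs => rw [extractF]
        simp only [h, dite_false]
        rfl

-- the masked value is a 41-bit natural
theorem band_mask_bounds (n : Int) :
    0 ≤ PySem.Int.band n ((2 ^ 41 - 1 : Nat) : Int) ∧
      (PySem.Int.band n ((2 ^ 41 - 1 : Nat) : Int)).toNat < 2 ^ 41 := by
  have hmask : (0 : Int) ≤ ((2 ^ 41 - 1 : Nat) : Int) := by positivity
  by_cases hn : 0 ≤ n
  · rw [PySem.Int.band_of_nonneg hn hmask]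
    refine ⟨by positivity, ?_⟩
    simp only [Int.toNat_natCast]
    have := Nat.and_le_right (n := n.toNat) (m := 2 ^ 41 - 1)
    omega
  · have e1 : PySem.Int.band n ((2 ^ 41 - 1 : Nat) : Int)
        = (((2 ^ 41 - 1) - ((2 ^ 41 - 1) &&& (-n - 1).toNat) : Nat) : Int) := by
      rw [PySem.Int.band.eq_1]
      simp only [hn, if_false, hmask, if_true, Int.toNat_natCast]
    rw [e1]
    refine ⟨by positivity, ?_⟩
    simp only [Int.toNat_natCast]
    omega

-- bits of an all-ones mask minus r are the flipped bits of r
theorem flipBit : ∀ (w r j : Nat), r < 2 ^ w → j < w → ((2 ^ w - 1) - r).testBit j = ! r.testBit j := by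
  intro w
  induction w with
  | zero => intro r j hr hj; omega
  | succ w ih =>
      intro r j hr hj
      have hpos : 0 < 2 ^ w := Nat.two_pow_pos w
      have h2 : (2 : Nat) ^ (w + 1) = 2 * 2 ^ w := by ring
      rw [h2] at hr ⊢
      cases j with
      | zero =>
          simp only [Nat.testBit_zero]
          rcases Nat.mod_two_eq_zero_or_one r with h | h
          · have hm : (2 * 2 ^ w - 1 - r) % 2 = 1 := by omega
            simp [hm, h]
          · have hm : (2 * 2 ^ w - 1 - r) % 2 = 0 := by omega
            simp [hm, h]
      | succ j =>
          simp only [Nat.testBit_succ]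
          have hdiv : (2 * 2 ^ w - 1 - r) / 2 = (2 ^ w - 1) - r / 2 := by omega
          rw [hdiv]
          exact ih (r / 2) j (by omega) (by omega)

-- bit i (i < 41) of the masked value is exactly A's test 'cap_bits & (1 << i) != 0'
theorem band_mask_testBit (n : Int) (i : Nat) (hi : i < 41) :
    (PySem.Int.band n ((2 ^ 41 - 1 : Nat) : Int)).toNat.testBit i
      = decide (PySem.Int.band n (((2 ^ i : Nat) : Int)) ≠ 0) := by
  have hmask : (0 : Int) ≤ ((2 ^ 41 - 1 : Nat) : Int) := by positivity
  have hpow : (0 : Int) ≤ ((2 ^ i : Nat) : Int) := by positivity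
  have hpowpos : 0 < 2 ^ i := Nat.two_pow_pos i
  by_cases hn : 0 ≤ n
  · rw [PySem.Int.band_of_nonneg hn hmask, PySem.Int.band_of_nonneg hn hpow]
    simp only [Int.toNat_natCast]
    rw [Nat.and_two_pow_sub_one_eq_mod, Nat.testBit_mod_two_pow]
    have hr : (((n.toNat &&& 2 ^ i : Nat) : Int) ≠ 0) ↔ n.toNat.testBit i = true := by
      rw [Nat.and_two_pow]
      cases h : n.toNat.testBit i <;> simp
    cases h : n.toNat.testBit i <;> simp [hi, h, hr]
  · have e1 : PySem.Int.band n ((2 ^ 41 - 1 : Nat) : Int)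
        = (((2 ^ 41 - 1) - ((2 ^ 41 - 1) &&& (-n - 1).toNat) : Nat) : Int) := by
      rw [PySem.Int.band.eq_1]
      simp only [hn, if_false, hmask, if_true, Int.toNat_natCast]
    have e2 : PySem.Int.band n (((2 ^ i : Nat) : Int))
        = ((2 ^ i - (2 ^ i &&& (-n - 1).toNat) : Nat) : Int) := by
      rw [PySem.Int.band.eq_1]
      simp only [hn, if_false, hpow, if_true, Int.toNat_natCast]
    rw [e1, e2]
    simp only [Int.toNat_natCast]
    set k := (-n - 1).toNat with hk
    rw [show (2 ^ 41 - 1) &&& k = k % 2 ^ 41 from by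
      rw [Nat.and_comm]; exact Nat.and_two_pow_sub_one_eq_mod k 41]
    rw [flipBit 41 (k % 2 ^ 41) i (Nat.mod_lt _ (by norm_num)) hi, Nat.testBit_mod_two_pow,
      Nat.two_pow_and]
    cases h : k.testBit i <;> simp [hi, h]

-- A's table is bits 0..40 with their names
theorem capitems_eq : CAPITEMS = (List.range 41).map (fun i : Nat => ((i : Int), capName i)) := by
  rfl

-- filterMap with an if-some-none function is map-over-filter
theorem filterMap_if {α β : Type} (g : α → β) (c : α → Bool) (l : List α) :
    l.filterMap (fun x => if c x then some (g x) else none) = (l.filter c).map g := by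
  induction l with
  | nil => simp
  | cons x xs ih => by_cases h : c x <;> simp [h, ih]

theorem one_shiftLeft_int (i : Nat) : (1 : Int) <<< ((i : Nat) : Int) = ((2 ^ i : Nat) : Int) := by
  rw [Int.shiftLeft_natCast_right, Int.shiftLeft_eq]
  push_cast
  ring

-- A's foldl over the table is the bit scan of the masked value
theorem portA_eq_bitScan (n : Int) :
    CAPITEMS.foldl (fun caps p =>
        if PySem.Int.band n ((1 : Int) <<< ((p.1.toNat : Nat) : Int)) ≠ 0 then caps ++ [p.2] else caps) []
      = bitScan capName 41 (PySem.Int.band n ((2 ^ 41 - 1 : Nat) : Int)).toNat := by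
  have hfold := PySem.List.foldl_append_if
    (p := fun p : Int × String => decide (PySem.Int.band n ((1 : Int) <<< ((p.1.toNat : Nat) : Int)) ≠ 0))
    (f := Prod.snd) (l := CAPITEMS) (acc := [])
  simp only [decide_eq_true_eq] at hfold
  rw [hfold, capitems_eq, List.filter_map, List.map_map, bitScan, filterMap_if]
  rw [show (Prod.snd ∘ fun i : Nat => ((i : Int), capName i)) = capName from rfl]
  rw [List.nil_append]
  congr 1
  apply List.filter_congr
  intro i hi
  simp only [List.mem_range] at hi
  simp only [Function.comp_apply, Int.toNat_natCast]
  simp only [one_shiftLeft_int]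
  exact (band_mask_testBit n i hi).symm

-- ===== VERDICT (by name: the statement is the Claim_ definition above) =====
theorem parse_capability_hex_spec : Claim_equal_parse_capability_hex := by
  intro hex_str _
  unfold Spec_parse_capability_hex parse_capability_hex parse_capability_hex_alt
  cases h : PySem.Int.ofStrBase? hex_str 16 with
  | none => rfl
  | some n =>
      dsimp only
      have hmask : ((1 : Int) <<< (41 : Int)) - 1 = ((2 ^ 41 - 1 : Nat) : Int) := by decide
      rw [hmask, portA_eq_bitScan n]
      obtain ⟨hnn, hlt⟩ := band_mask_bounds n
      show bitScan capName 41 (PySem.Int.band n ((2 ^ 41 - 1 : Nat) : Int)).toNat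
          = extractCaps (PySem.Int.band n ((2 ^ 41 - 1 : Nat) : Int)).toNat
              (PySem.Int.band n ((2 ^ 41 - 1 : Nat) : Int))
      set m := PySem.Int.band n ((2 ^ 41 - 1 : Nat) : Int) with hm
      have hcast : m = ((m.toNat : Nat) : Int) := (Int.toNat_of_nonneg hnn).symm
      conv_rhs => rw [hcast]
      rw [Int.toNat_natCast]
      rw [extractCaps_eq_extractF m.toNat m.toNat le_rfl]
      rw [extractF_eq_bitScan 41 capName m.toNat hlt]
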